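-- pv_equiv track=rewrite | github.com/Alexerson/adventofcode | src/y2017/day16.py | part2
-- ===== SOURCE A (Python) =====
-- from collections import deque
-- from string import ascii_lowercase
--
-- def part1(data, length=16, line=None):
--     if line is None:
--         line = deque(ascii_lowercase[:length])
--
--     for move in data:
--         if move[0] == 's':
--             line.rotate(int(move[1:]))
--
--         if move[0] == 'x':
--             pos1, pos2 = move[1:].split('/')
--             pos1 = int(pos1)
--             pos2 = int(pos2)
--             line[pos1], line[pos2] = line[pos2], line[pos1]
--
--         if move[0] == 'p':
--             prog1, prog2 = move[1:].split('/')
--             pos1 = line.index(prog1)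
--             pos2 = line.index(prog2)
--             line[pos1], line[pos2] = line[pos2], line[pos1]
--
--     return ''.join(line)
--
-- def part2(data, length=16):
--     line = deque(ascii_lowercase[:length])
--
--     known = {}
--     iteration = 0
--
--     while ''.join(line) not in known:
--         known[''.join(line)] = iteration
--         part1(data, line=line)
--         iteration += 1
--
--     return {b: a for a, b in known.items()}[1000000000 % iteration]
-- ===== SOURCE B (Python) =====
-- from string import ascii_lowercase
--
-- def part2(data, length=16):
--     # One pass over the moves precomposes the whole dance into a positional
--     # permutation P and a symbol-relabeling list R; the cycle loop applies
--     # the precomposed (P, R) once per iteration instead of replaying the moves.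
--     letters = ascii_lowercase[:length]
--     n = len(letters)
--     P = list(range(n))      # slot i of the new line takes old position P[i]
--     R = list(letters)       # letters[t] is relabeled to R[t] afterwards
--     for move in data:
--         if move[0] == 's' and n:
--             k = int(move[1:]) % n
--             P = P[n - k:] + P[:n - k]
--         elif move[0] == 'x':
--             a, b = move[1:].split('/')
--             a, b = int(a), int(b)
--             P[a], P[b] = P[b], P[a]
--         elif move[0] == 'p':
--             c1, c2 = move[1:].split('/')
--             i, j = R.index(c1), R.index(c2)
--             R[i], R[j] = R[j], R[i]
--     relabel = dict(zip(letters, R))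
--     states, seen, cur = [], set(), letters
--     while cur not in seen:
--         seen.add(cur)
--         states.append(cur)
--         cur = ''.join(relabel[cur[p]] for p in P)
--     return states[1000000000 % len(states)]
-- ===== Notes on version B (the rewrite author's own statement) =====
-- stated objective: alternative
-- what changed: Instead of replaying every dance move on the line in each iteration of the cycle-detection loop, B folds the move list once into a positional permutation P and a symbol-relabeling list R and applies the precomposed pair per iteration, keeping a plain list of visited states in place of A's dict-plus-inverted-dict lookup.
import Mathlib
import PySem

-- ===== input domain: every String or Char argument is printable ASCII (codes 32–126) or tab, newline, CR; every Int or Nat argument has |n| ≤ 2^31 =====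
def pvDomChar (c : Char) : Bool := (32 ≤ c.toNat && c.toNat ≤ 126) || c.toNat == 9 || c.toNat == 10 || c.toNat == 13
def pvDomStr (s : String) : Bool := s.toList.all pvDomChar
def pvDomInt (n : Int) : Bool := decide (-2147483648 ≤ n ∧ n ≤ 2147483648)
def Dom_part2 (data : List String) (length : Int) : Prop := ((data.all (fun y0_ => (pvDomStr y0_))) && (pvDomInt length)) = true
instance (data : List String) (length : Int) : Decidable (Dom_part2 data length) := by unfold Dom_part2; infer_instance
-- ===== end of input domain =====

-- B precomposes the whole dance into one positional permutation and one symbol relabeling,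
-- and the cycle-detection loop applies that precomposed pair instead of replaying the moves.


-- ===== PORT A =====
-- ascii_lowercase
def pvLowercase : List Char :=
  ['a','b','c','d','e','f','g','h','i','j','k','l','m','n','o','p','q','r','s','t','u','v','w','x','y','z']

-- ascii_lowercase[:length]
def pvLetters (length : Int) : List Char := PySem.List.slice pvLowercase none (some length)

-- deque.rotate(k): right-rotation by k mod len; no-op on an empty deque (exact for every Int k)
def pvRotate (line : List Char) (k : Int) : List Char :=
  if line.length = 0 then line
  else
    let j := line.length - (PySem.Int.mod k (line.length : Int)).toNat
    line.drop j ++ line.take j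

-- line[i], line[j] = line[j], line[i]  (both RHS reads happen first, then the two assignments)
def pvSwapAt? {α : Type} (line : List α) (i j : Int) : Option (List α) :=
  (PySem.List.pyGet? line i).bind fun a =>
  (PySem.List.pyGet? line j).bind fun b =>
  (PySem.List.pySet? line i b).bind fun line1 =>
  PySem.List.pySet? line1 j a

-- one iteration of part1's move loop; none = exactly where Python raises
def pvApplyMove (line : List Char) (move : String) : Option (List Char) :=
  match move.toList with
  | [] => none                       -- move[0]: IndexError
  | c :: rest =>
    (if c = 's' then (PySem.Int.ofChars? rest).map (fun k => pvRotate line k)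
     else some line).bind fun line =>
    (if c = 'x' then
        match PySem.Chars.splitOn rest ['/'] with
        | [s1, s2] =>
          (PySem.Int.ofChars? s1).bind fun p1 =>
          (PySem.Int.ofChars? s2).bind fun p2 =>
          pvSwapAt? line p1 p2
        | _ => none                  -- unpacking into (pos1, pos2) fails: ValueError
      else some line).bind fun line =>
    if c = 'p' then
      match PySem.Chars.splitOn rest ['/'] with
      | [s1, s2] =>
        -- line.index(prog): the deque holds 1-char strings, so prog matches iff it is [ch] with ch in line
        (match s1 with | [c1] => PySem.List.index? line c1 | _ => none).bind fun p1 =>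
        (match s2 with | [c2] => PySem.List.index? line c2 | _ => none).bind fun p2 =>
        pvSwapAt? line (p1 : Int) (p2 : Int)
      | _ => none
    else some line

-- part1's for-loop (part2 only uses its in-place effect on line)
def pvRunMoves (line : List Char) : List String → Option (List Char)
  | [] => some line
  | m :: ms =>
    match pvApplyMove line m with
    | none => none
    | some line' => pvRunMoves line' ms

-- part2's while-loop. The dict is keyed by the line itself (''.join is injective on lines,
-- so List Char keys are the faithful image of the joined-string keys). fuel is only a
-- termination bound, proven sufficient under Pre_ (the loop always exits earlier).
def pvLoopA (data : List String) : Nat → List Char → PySem.Dict (List Char) Int → Int → Option String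
  | 0, _, _, _ => none
  | fuel+1, line, known, iteration =>
    if known.contains line then
      -- {b: a for a, b in known.items()}[1000000000 % iteration]
      ((PySem.Dict.ofList (known.items.map (fun p => (p.2, p.1)))).get?
        (PySem.Int.mod 1000000000 iteration)).map String.ofList
    else
      match pvRunMoves line data with
      | none => none
      | some line' => pvLoopA data fuel line' (known.insert line iteration) (iteration + 1)

def part2 (data : List String) (length : Int) : String :=
  let line := pvLetters length
  ((pvLoopA data (Nat.factorial line.length + 1) line PySem.Dict.empty 0).getD "")

-- ===== PORT B =====
-- one iteration of Source B's move loop over the pair (P, R); none = exactly where Source B raises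
def pvBuildStep (n : Nat) (pq : List Int × List Char) (move : String) :
    Option (List Int × List Char) :=
  match move.toList with
  | [] => none                       -- move[0]: IndexError
  | c :: rest =>
    if c = 's' ∧ n ≠ 0 then
      (PySem.Int.ofChars? rest).map fun k0 =>
        let k := (PySem.Int.mod k0 (n : Int)).toNat
        (PySem.List.slice pq.1 (some ((n - k : Nat) : Int)) none ++
         PySem.List.slice pq.1 none (some ((n - k : Nat) : Int)), pq.2)
    else if c = 'x' then
      match PySem.Chars.splitOn rest ['/'] with
      | [s1, s2] =>
        (PySem.Int.ofChars? s1).bind fun a =>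
        (PySem.Int.ofChars? s2).bind fun b =>
        (pvSwapAt? pq.1 a b).map fun P' => (P', pq.2)
      | _ => none
    else if c = 'p' then
      match PySem.Chars.splitOn rest ['/'] with
      | [s1, s2] =>
        (match s1 with | [c1] => PySem.List.index? pq.2 c1 | _ => none).bind fun i =>
        (match s2 with | [c2] => PySem.List.index? pq.2 c2 | _ => none).bind fun j =>
        (pvSwapAt? pq.2 (i : Int) (j : Int)).map fun R' => (pq.1, R')
      | _ => none
    else some pq

-- Source B's for-loop over the moves
def pvBuild (n : Nat) : (List Int × List Char) → List String → Option (List Int × List Char)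
  | pq, [] => some pq
  | pq, m :: ms =>
    match pvBuildStep n pq m with
    | none => none
    | some pq' => pvBuild n pq' ms

-- ''.join(relabel[cur[p]] for p in P)
def pvStep (P : List Int) (relabel : PySem.Dict Char Char) (cur : List Char) :
    Option (List Char) :=
  P.mapM fun p => (PySem.List.pyGet? cur p).bind fun ch => relabel.get? ch

-- Source B's while-loop (states as char lists; same fuel bound, proven sufficient under Pre_)
def pvLoopB (P : List Int) (relabel : PySem.Dict Char Char) :
    Nat → List Char → List (List Char) → PySem.Set (List Char) → Option (List (List Char))
  | 0, _, _, _ => none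
  | fuel+1, cur, states, seen =>
    if PySem.Set.contains seen cur then some states
    else
      match pvStep P relabel cur with
      | none => none
      | some nxt => pvLoopB P relabel fuel nxt (states ++ [cur]) (PySem.Set.add seen cur)

def part2_alt (data : List String) (length : Int) : String :=
  let letters := pvLetters length
  let n := letters.length
  match pvBuild n (PySem.List.pyRange 0 (n : Int) 1, letters) data with
  | none => ""
  | some (P, R) =>
    let relabel : PySem.Dict Char Char := PySem.Dict.ofList (letters.zip R)
    match pvLoopB P relabel (Nat.factorial n + 1) letters [] PySem.Set.empty with
    | none => ""
    | some states =>
      ((PySem.List.pyGet? states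
          (PySem.Int.mod 1000000000 (PySem.List.len states))).map String.ofList).getD ""

-- ===== PRECONDITION & SPEC =====
-- Pre_ admits exactly the move lists on which A returns (A raises on any other move:
-- IndexError/ValueError on malformed or out-of-range s/x moves, ValueError on p-moves
-- naming programs outside the line).
def pvMoveOK (n : Nat) (letters : List Char) (move : String) : Bool :=
  match move.toList with
  | [] => false
  | c :: rest =>
    if c = 's' then (PySem.Int.ofChars? rest).isSome
    else if c = 'x' then
      match PySem.Chars.splitOn rest ['/'] with
      | [s1, s2] =>
        match PySem.Int.ofChars? s1, PySem.Int.ofChars? s2 with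
        | some i, some j => decide (-(n : Int) ≤ i ∧ i < n ∧ -(n : Int) ≤ j ∧ j < n)
        | _, _ => false
      | _ => false
    else if c = 'p' then
      match PySem.Chars.splitOn rest ['/'] with
      | [[c1], [c2]] => letters.contains c1 && letters.contains c2
      | _ => false
    else true

def Pre_part2 (data : List String) (length : Int) : Prop :=
  ∀ m ∈ data, pvMoveOK (pvLetters length).length (pvLetters length) m = true

instance (data : List String) (length : Int) : Decidable (Pre_part2 data length) := by
  unfold Pre_part2; infer_instance

def pvWitness_part2 : List String × Int := (["s1", "x0/1", "pa/b"], 3)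

def Spec_part2 (data : List String) (length : Int) (out : String) : Prop := out = part2_alt data length
instance (data : List String) (length : Int) (out : String) : Decidable (Spec_part2 data length out) := by unfold Spec_part2; infer_instance

-- ===== CLAIM (what is proved, stated in full; the proofs are below) =====
def Claim_equal_part2 : Prop := ∀ (data : List String) (length : Int), Dom_part2 data length → Pre_part2 data length → Spec_part2 data length (part2 data length)

-- ===== LEMMAS AND PROOFS =====

-- the symbol transposition a p-move performs
def pvTau (c1 c2 x : Char) : Char := if x = c1 then c2 else if x = c2 then c1 else x

-- relabeling function encoded by R over letters
def pvRelF (letters R : List Char) (c : Char) : Char := R.getD (letters.idxOf c) c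

-- the semantic effect of (P, R) on a line L
def pvSPR (letters : List Char) (P : List Int) (R L : List Char) : List Char :=
  P.map (fun p => pvRelF letters R (PySem.List.pyGetD L p '?'))

theorem pvLetters_nodup (length : Int) : (pvLetters length).Nodup := by
  have h : (pvLetters length).Sublist pvLowercase := by
    simp only [pvLetters, PySem.List.slice]
    exact (List.take_sublist _ _).trans (List.drop_sublist _ _)
  exact h.nodup (by decide)

theorem pvSwapAt?_spec {α : Type} (L : List α) (i j : Int) (a b : Nat)
    (ha : PySem.List.pyIdx? L.length i = some a) (hb : PySem.List.pyIdx? L.length j = some b)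
    (ha' : a < L.length) (hb' : b < L.length) :
    pvSwapAt? L i j = some ((L.set a L[b]).set b L[a]) := by
  simp [pvSwapAt?, PySem.List.pyGet?, PySem.List.pySet?, ha, hb, ha', hb']

theorem pvPyIdx?_of_inRange (n : Nat) (i : Int) (h : -(n : Int) ≤ i ∧ i < n) :
    ∃ a, PySem.List.pyIdx? n i = some a ∧ a < n := by
  unfold PySem.List.pyIdx?
  by_cases h0 : 0 ≤ i
  · exact ⟨i.toNat, by simp [h0, h.2], by omega⟩
  · refine ⟨n - (-i).toNat, by simp [h0, h.1], by omega⟩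

theorem pvSwapAt?_map {α β : Type} (L : List α) (f : α → β) (i j : Int) :
    pvSwapAt? (L.map f) i j = (pvSwapAt? L i j).map (List.map f) := by
  simp only [pvSwapAt?, PySem.List.pyGet?, PySem.List.pySet?, List.length_map]
  cases h1 : PySem.List.pyIdx? L.length i with
  | none => simp
  | some a =>
    cases h2 : PySem.List.pyIdx? L.length j with
    | none => simp
    | some b =>
      simp only [Option.bind_some]
      cases h3 : L[a]? with
      | none => simp [List.getElem?_map, h3]
      | some x =>
        cases h4 : L[b]? with
        | none => simp [List.getElem?_map, h3, h4]
        | some y =>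
          simp [List.getElem?_map, h3, h4, h2, List.map_set]

theorem pvPyIdx?_natCast (n a : Nat) (ha : a < n) :
    PySem.List.pyIdx? n ((a : Nat) : Int) = some a := by
  unfold PySem.List.pyIdx?
  rw [if_pos (by omega), if_pos (by exact_mod_cast ha)]
  simp

theorem pvSwapSet_eq_map (L : List Char) (hnd : L.Nodup) (c1 c2 : Char)
    (h1 : c1 ∈ L) (h2 : c2 ∈ L) :
    ((L.set (L.idxOf c1) (L[L.idxOf c2]'(List.idxOf_lt_length_of_mem h2))).set (L.idxOf c2)
      (L[L.idxOf c1]'(List.idxOf_lt_length_of_mem h1))) = L.map (pvTau c1 c2) := by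
  have hi : L.idxOf c1 < L.length := List.idxOf_lt_length_of_mem h1
  have hj : L.idxOf c2 < L.length := List.idxOf_lt_length_of_mem h2
  have e1 : L[L.idxOf c1] = c1 := List.getElem_idxOf hi
  have e2 : L[L.idxOf c2] = c2 := List.getElem_idxOf hj
  apply List.ext_getElem (by simp)
  intro k hk hk'
  simp only [List.getElem_set, List.getElem_map]
  by_cases hkj : L.idxOf c2 = k
  · subst hkj
    simp only [if_pos rfl, e1, e2]
    rcases eq_or_ne c2 c1 with h | h <;> simp [pvTau, h]
  · by_cases hki : L.idxOf c1 = k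
    · subst hki
      simp only [if_neg hkj, if_pos rfl, e1, e2]
      simp [pvTau]
    · simp only [if_neg hkj, if_neg hki]
      have n1 : L[k]'(by simpa using hk') ≠ c1 := fun e =>
        hki ((List.Nodup.getElem_inj_iff hnd).1 (e1.trans e.symm))
      have n2 : L[k]'(by simpa using hk') ≠ c2 := fun e =>
        hkj ((List.Nodup.getElem_inj_iff hnd).1 (e2.trans e.symm))
      simp [pvTau, n1, n2]

theorem pvIndexSwap_eq_map (L : List Char) (hnd : L.Nodup) (c1 c2 : Char)
    (h1 : c1 ∈ L) (h2 : c2 ∈ L) :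
    pvSwapAt? L ((L.idxOf c1 : Nat) : Int) ((L.idxOf c2 : Nat) : Int) =
      some (L.map (pvTau c1 c2)) := by
  have hi : L.idxOf c1 < L.length := List.idxOf_lt_length_of_mem h1
  have hj : L.idxOf c2 < L.length := List.idxOf_lt_length_of_mem h2
  rw [pvSwapAt?_spec L _ _ _ _ (pvPyIdx?_natCast _ _ hi) (pvPyIdx?_natCast _ _ hj) hi hj]
  exact congrArg some (pvSwapSet_eq_map L hnd c1 c2 h1 h2)

theorem pvMapTau_perm (L : List Char) (hnd : L.Nodup) (c1 c2 : Char)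
    (h1 : c1 ∈ L) (h2 : c2 ∈ L) : (L.map (pvTau c1 c2)).Perm L := by
  rw [← pvSwapSet_eq_map L hnd c1 c2 h1 h2]
  exact List.set_set_perm (List.idxOf_lt_length_of_mem h1) (List.idxOf_lt_length_of_mem h2)

theorem pvIndex?_of_mem {α : Type} [BEq α] [LawfulBEq α] (L : List α) (x : α) (h : x ∈ L) :
    PySem.List.index? L x = some (L.idxOf x) := by
  simp only [PySem.List.index?]
  induction L with
  | nil => cases h
  | cons y t ih =>
    by_cases hy : y = x
    · simp [List.idxOf?, List.findIdx?_cons, List.idxOf, List.findIdx_cons, hy]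
    · have hx : x ∈ t := by cases h with | head => exact absurd rfl (Ne.symm hy) | tail _ h => exact h
      have := ih hx
      simp only [List.idxOf?] at this
      simp [List.idxOf?, List.findIdx?_cons, List.idxOf, List.findIdx_cons, beq_iff_eq, hy, this]
      simp [Bool.cond_eq_if, beq_iff_eq, hy]

theorem pvRelF_self (letters : List Char) (c : Char) (hc : c ∈ letters) :
    pvRelF letters letters c = c := by
  unfold pvRelF
  rw [List.getD_eq_getElem _ _ (List.idxOf_lt_length_of_mem hc)]
  exact List.getElem_idxOf _

theorem pvMapRelF (letters R : List Char) (hnd : letters.Nodup) (hlen : R.length = letters.length) :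
    letters.map (pvRelF letters R) = R := by
  apply List.ext_getElem (by simp [hlen])
  intro i h1 h2
  simp only [List.getElem_map, pvRelF]
  rw [List.Nodup.idxOf_getElem hnd i (by simpa using h1)]
  rw [List.getD_eq_getElem _ _ (by omega)]

theorem pvSPR_range (letters R L : List Char) (hlen : L.length = letters.length) :
    pvSPR letters (PySem.List.pyRange 0 (letters.length : Int) 1) R L =
      L.map (pvRelF letters R) := by
  unfold pvSPR
  rw [PySem.List.pyRange_one]
  apply List.ext_getElem (by simp [hlen])
  intro i h1 h2
  simp only [List.map_map, List.getElem_map, List.getElem_range, Function.comp_apply, zero_add]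
  rw [PySem.List.pyGetD_natCast]
  congr 1
  rw [List.getD_eq_getElem]

theorem pvSPR_id (letters L : List Char) (hnd : letters.Nodup) (hL : L.Perm letters) :
    pvSPR letters (PySem.List.pyRange 0 (letters.length : Int) 1) letters L = L := by
  rw [pvSPR_range letters letters L hL.length_eq]
  rw [List.map_congr_left (fun c hc => pvRelF_self letters c (hL.subset hc))]
  exact List.map_id L

theorem pvSPR_perm (letters : List Char) (P : List Int) (R L : List Char)
    (hnd : letters.Nodup)
    (hP : P.Perm (PySem.List.pyRange 0 (letters.length : Int) 1))
    (hR : R.Perm letters) (hL : L.Perm letters) :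
    (pvSPR letters P R L).Perm letters := by
  have h1 : (pvSPR letters P R L).Perm
      (pvSPR letters (PySem.List.pyRange 0 (letters.length : Int) 1) R L) := hP.map _
  rw [pvSPR_range letters R L hL.length_eq] at h1
  have h3 : (L.map (pvRelF letters R)).Perm (letters.map (pvRelF letters R)) := hL.map _
  rw [pvMapRelF letters R hnd hR.length_eq] at h3
  exact h1.trans (h3.trans hR)

theorem pvBridgeMove (letters : List Char) (hnd : letters.Nodup) (move : String)
    (hm : pvMoveOK letters.length letters move = true)
    (P : List Int) (R : List Char)
    (hP : P.Perm (PySem.List.pyRange 0 (letters.length : Int) 1))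
    (hR : R.Perm letters) :
    ∃ P' R', pvBuildStep letters.length (P, R) move = some (P', R') ∧
      P'.Perm (PySem.List.pyRange 0 (letters.length : Int) 1) ∧ R'.Perm letters ∧
      ∀ L, L.Perm letters →
        pvApplyMove (pvSPR letters P R L) move = some (pvSPR letters P' R' L) := by
  have hPlen : P.length = letters.length := by
    simpa [PySem.List.length_pyRange_one] using hP.length_eq
  unfold pvMoveOK at hm
  unfold pvBuildStep pvApplyMove
  cases hcs : move.toList with
  | nil => rw [hcs] at hm; simp at hm
  | cons c rest =>
    rw [hcs] at hm
    dsimp only at hm ⊢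
    by_cases hs : c = 's'
    · -- ===== s-move =====
      subst hs
      rw [if_pos rfl] at hm
      obtain ⟨k, hk⟩ := Option.isSome_iff_exists.1 hm
      by_cases hn : letters.length = 0
      · -- empty line: rotate is a no-op and Source B skips the branch
        rw [if_neg (by simp [hn]), if_neg (by decide : ¬('s' : Char) = 'x'),
          if_neg (by decide : ¬('s' : Char) = 'p')]
        refine ⟨P, R, rfl, hP, hR, ?_⟩
        intro L hL
        have hP0 : P = [] := List.eq_nil_of_length_eq_zero (by omega)
        simp only [reduceIte]
        simp [pvSPR, hP0, pvRotate, hk]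
      · rw [if_pos ⟨rfl, hn⟩, hk]
        simp only [Option.map_some]
        refine ⟨_, R, rfl, ?_, hR, ?_⟩
        · refine List.Perm.trans ?_ hP
          rw [PySem.List.slice_from_natCast, PySem.List.slice_to_natCast]
          exact List.perm_append_comm.trans (by rw [List.take_append_drop])
        · intro L hL
          simp only [hk, Option.map_some, Option.bind_some, reduceIte]
          congr 1
          rw [PySem.List.slice_from_natCast, PySem.List.slice_to_natCast]
          unfold pvSPR pvRotate
          simp [List.map_append, ← List.map_drop, ← List.map_take, hPlen, hn]
    · by_cases hx : c = 'x'
      · -- ===== x-move =====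
        subst hx
        rw [if_neg (by decide : ¬('x' : Char) = 's'), if_pos rfl] at hm
        rcases hsp : PySem.Chars.splitOn rest ['/'] with _ | ⟨s1, _ | ⟨s2, _ | _⟩⟩ <;>
          rw [hsp] at hm <;> try simp at hm
        rcases h1 : PySem.Int.ofChars? s1 with _ | i <;> rw [h1] at hm <;> try simp at hm
        rcases h2 : PySem.Int.ofChars? s2 with _ | j <;> rw [h2] at hm <;> try simp at hm
        obtain ⟨hi1, hi2, hj1, hj2⟩ := hm
        obtain ⟨a, ha, ha'⟩ := pvPyIdx?_of_inRange letters.length i ⟨hi1, hi2⟩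
        obtain ⟨b, hb, hb'⟩ := pvPyIdx?_of_inRange letters.length j ⟨hj1, hj2⟩
        have hswB := pvSwapAt?_spec P i j a b (hPlen ▸ ha) (hPlen ▸ hb)
          (by omega) (by omega)
        rw [if_neg (by simp : ¬(('x' : Char) = 's' ∧ letters.length ≠ 0)), if_pos rfl]
        try dsimp only
        rw [h1, Option.bind_some, h2, Option.bind_some, hswB, Option.map_some]
        refine ⟨_, R, rfl, (List.set_set_perm (by omega) (by omega)).trans hP, hR, ?_⟩
        intro L hL
        rw [if_neg (by decide : ¬('x' : Char) = 's'), Option.bind_some, if_pos rfl]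
        try dsimp only
        simp only [h1, h2, Option.bind_some]
        have hmap := pvSwapAt?_map P
          (fun p => pvRelF letters R (PySem.List.pyGetD L p '?')) i j
        rw [show pvSPR letters P R L =
          P.map (fun p => pvRelF letters R (PySem.List.pyGetD L p '?')) from rfl, hmap, hswB]
        rw [Option.map_some, Option.bind_some, if_neg (by decide : ¬('x' : Char) = 'p')]
        rfl
      · by_cases hp : c = 'p'
        · -- ===== p-move =====
          subst hp
          rw [if_neg (by decide : ¬('p' : Char) = 's'),
            if_neg (by decide : ¬('p' : Char) = 'x'), if_pos rfl] at hm
          rcases hsp : PySem.Chars.splitOn rest ['/'] with _ | ⟨s1, _ | ⟨s2, _ | _⟩⟩ <;>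
            rw [hsp] at hm <;> try simp at hm
          rcases s1 with _ | ⟨c1, _ | _⟩ <;> try simp at hm
          rcases s2 with _ | ⟨c2, _ | _⟩ <;> try simp at hm
          obtain ⟨hc1, hc2⟩ := hm
          have hRnd : R.Nodup := (hR.nodup_iff).2 hnd
          have hc1R : c1 ∈ R := (hR.mem_iff).2 hc1
          have hc2R : c2 ∈ R := (hR.mem_iff).2 hc2
          rw [if_neg (by simp : ¬(('p' : Char) = 's' ∧ letters.length ≠ 0)),
            if_neg (by decide : ¬('p' : Char) = 'x'), if_pos rfl]
          try dsimp only
          rw [pvIndex?_of_mem R c1 hc1R, Option.bind_some,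
            pvIndex?_of_mem R c2 hc2R, Option.bind_some,
            pvIndexSwap_eq_map R hRnd c1 c2 hc1R hc2R, Option.map_some]
          refine ⟨P, R.map (pvTau c1 c2), rfl, hP,
            (pvMapTau_perm R hRnd c1 c2 hc1R hc2R).trans hR, ?_⟩
          intro L hL
          have hM : (pvSPR letters P R L).Perm letters := pvSPR_perm letters P R L hnd hP hR hL
          have hMnd : (pvSPR letters P R L).Nodup := (hM.nodup_iff).2 hnd
          have hc1M : c1 ∈ pvSPR letters P R L := (hM.mem_iff).2 hc1
          have hc2M : c2 ∈ pvSPR letters P R L := (hM.mem_iff).2 hc2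
          rw [if_neg (by decide : ¬('p' : Char) = 's'), Option.bind_some,
            if_neg (by decide : ¬('p' : Char) = 'x'), Option.bind_some, if_pos rfl]
          try dsimp only
          rw [pvIndex?_of_mem _ c1 hc1M, Option.bind_some,
            pvIndex?_of_mem _ c2 hc2M, Option.bind_some,
            pvIndexSwap_eq_map _ hMnd c1 c2 hc1M hc2M]
          congr 1
          -- map τ (SPR P R L) = SPR P (map τ R) L
          unfold pvSPR
          rw [List.map_map]
          apply List.map_congr_left
          intro p hp'
          have hpmem : p ∈ PySem.List.pyRange 0 (letters.length : Int) 1 := hP.subset hp'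
          rw [PySem.List.mem_pyRange_one] at hpmem
          have hLlen : L.length = letters.length := hL.length_eq
          have hch : PySem.List.pyGetD L p '?' ∈ letters := by
            refine hL.subset (PySem.List.pyGetD_mem _ _ ?_)
            show -(L.length : Int) ≤ p ∧ p < L.length
            constructor <;> omega
          have hidx : letters.idxOf (PySem.List.pyGetD L p '?') < R.length := by
            rw [hR.length_eq]
            exact List.idxOf_lt_length_of_mem hch
          show pvTau c1 c2 (pvRelF letters R (PySem.List.pyGetD L p '?')) =
            pvRelF letters (R.map (pvTau c1 c2)) (PySem.List.pyGetD L p '?')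
          unfold pvRelF
          rw [List.getD_eq_getElem _ _ hidx, List.getD_eq_getElem _ _ (by simpa using hidx),
            List.getElem_map]
        · -- ===== any other move: ignored by both =====
          rw [if_neg (by simp [hs]), if_neg hx, if_neg hp]
          refine ⟨P, R, rfl, hP, hR, ?_⟩
          intro L hL
          rw [if_neg hs, Option.bind_some, if_neg hx, Option.bind_some, if_neg hp]

theorem pvBridge (letters : List Char) (hnd : letters.Nodup) (data : List String)
    (hdata : ∀ m ∈ data, pvMoveOK letters.length letters m = true)
    (P : List Int) (R : List Char)
    (hP : P.Perm (PySem.List.pyRange 0 (letters.length : Int) 1))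
    (hR : R.Perm letters) :
    ∃ P' R', pvBuild letters.length (P, R) data = some (P', R') ∧
      P'.Perm (PySem.List.pyRange 0 (letters.length : Int) 1) ∧ R'.Perm letters ∧
      ∀ L, L.Perm letters →
        pvRunMoves (pvSPR letters P R L) data = some (pvSPR letters P' R' L) := by
  induction data generalizing P R with
  | nil => exact ⟨P, R, rfl, hP, hR, fun L hL => rfl⟩
  | cons m ms ih =>
    obtain ⟨P1, R1, hstep, hP1, hR1, hA⟩ :=
      pvBridgeMove letters hnd m (hdata m (List.mem_cons_self)) P R hP hR
    obtain ⟨P', R', hbuild, hP', hR', hrun⟩ :=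
      ih (fun x hx => hdata x (List.mem_cons_of_mem _ hx)) P1 R1 hP1 hR1
    refine ⟨P', R', ?_, hP', hR', ?_⟩
    · simp only [pvBuild, hstep]
      exact hbuild
    · intro L hL
      simp only [pvRunMoves, hA L hL]
      exact hrun L hL

theorem pvOfListItems {κ ν : Type} [BEq κ] [LawfulBEq κ] (ps : List (κ × ν))
    (hnd : (ps.map Prod.fst).Nodup) : (PySem.Dict.ofList ps).items = ps := by
  have h := PySem.Dict.items_foldl_insert_fresh ps Prod.fst Prod.snd PySem.Dict.empty
    (fun a _ => by simp [PySem.Dict.contains_empty]) hnd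
  simpa using h

theorem pvRelabelGet (letters R : List Char) (hnd : letters.Nodup)
    (hlen : R.length = letters.length) (c : Char) (hc : c ∈ letters) :
    (PySem.Dict.ofList (letters.zip R)).get? c = some (pvRelF letters R c) := by
  have hfst : (letters.zip R).map Prod.fst = letters := List.map_fst_zip (by omega)
  have hitems := pvOfListItems (letters.zip R) (by rw [hfst]; exact hnd)
  have hidx : letters.idxOf c < letters.length := List.idxOf_lt_length_of_mem hc
  have hmem : (c, pvRelF letters R c) ∈ (PySem.Dict.ofList (letters.zip R)).items := by
    rw [hitems, List.mem_iff_getElem]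
    refine ⟨letters.idxOf c, by simp [List.length_zip]; omega, ?_⟩
    rw [List.getElem_zip]
    have e1 : letters[letters.idxOf c] = c := List.getElem_idxOf hidx
    have e2 : R[letters.idxOf c]'(by omega) = pvRelF letters R c := by
      unfold pvRelF
      rw [List.getD_eq_getElem _ _ (by omega)]
    rw [e1, e2]
  refine PySem.Dict.get?_of_mem_items _ hmem ?_
  simp only [PySem.Dict.keys, hitems, hfst]
  exact hnd

theorem pvMapM_some {α β : Type} (P : List α) (f : α → Option β) (g : α → β)
    (h : ∀ p ∈ P, f p = some (g p)) : P.mapM f = some (P.map g) := by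
  induction P with
  | nil => rfl
  | cons x t ih =>
    rw [List.mapM_cons, h x (List.mem_cons_self), ih (fun p hp => h p (List.mem_cons_of_mem _ hp))]
    rfl

theorem pvStep_eq (letters : List Char) (P : List Int) (R cur : List Char)
    (hnd : letters.Nodup)
    (hP : P.Perm (PySem.List.pyRange 0 (letters.length : Int) 1))
    (hR : R.Perm letters) (hcur : cur.Perm letters) :
    pvStep P (PySem.Dict.ofList (letters.zip R)) cur = some (pvSPR letters P R cur) := by
  have hclen : cur.length = letters.length := hcur.length_eq
  unfold pvStep pvSPR
  apply pvMapM_some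
  intro p hp
  have hpmem : p ∈ PySem.List.pyRange 0 (letters.length : Int) 1 := hP.subset hp
  rw [PySem.List.mem_pyRange_one] at hpmem
  have h0 : 0 ≤ p := hpmem.1
  have h1 : p.toNat < cur.length := by omega
  rw [PySem.List.pyGet?_of_nonneg _ h0, List.getElem?_eq_getElem h1]
  have hcm : cur[p.toNat] ∈ letters := hcur.subset (List.getElem_mem h1)
  rw [Option.bind_some]
  rw [pvRelabelGet letters R hnd hR.length_eq _ hcm]
  rw [PySem.List.pyGetD_eq_getElem _ _ h0 (by rw [hclen]; exact_mod_cast hpmem.2)]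

theorem pvZipIdxSnd (states : List (List Char)) :
    ∀ k : Nat, (states.zipIdx k).map (fun p => ((p.2 : Nat) : Int)) =
      (List.range' k states.length).map (fun a => ((a : Nat) : Int)) := by
  induction states with
  | nil => intro k; simp
  | cons s t ih => intro k; simp [List.zipIdx_cons, List.range'_succ, ih (k + 1)]

theorem pvPigeonhole (letters : List Char) (states : List (List Char))
    (hnds : states.Nodup) (hall : ∀ s ∈ states, s.Perm letters) :
    states.length ≤ Nat.factorial letters.length := by
  have hsub : states ⊆ letters.permutations := fun s hs => List.mem_permutations.2 (hall s hs)
  have := (hnds.subperm hsub).length_le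
  simpa [List.length_permutations] using this

theorem pvKnownContains (states : List (List Char)) (cur : List Char) :
    (PySem.Dict.mk (states.zipIdx.map (fun p => (p.1, (p.2 : Int))))).contains cur =
      states.contains cur := by
  simp only [PySem.Dict.contains, List.any_map]
  suffices h : ∀ k : Nat, (states.zipIdx k).any
      ((fun p : List Char × Int => p.1 == cur) ∘ (fun p : List Char × Nat => (p.1, (p.2 : Int)))) =
      states.contains cur from h 0
  intro k
  induction states generalizing k with
  | nil => simp
  | cons s t ih =>
    by_cases h : s = cur
    · simp [List.zipIdx_cons, h]
    · simp [List.zipIdx_cons, ih (k + 1), beq_iff_eq, h, Ne.symm h]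

theorem pvInvLookup (states : List (List Char)) (m : Int)
    (h0 : 0 ≤ m) (hm : m.toNat < states.length) :
    (PySem.Dict.ofList
        ((PySem.Dict.mk (states.zipIdx.map (fun p => (p.1, (p.2 : Int))))).items.map
          (fun p => (p.2, p.1)))).get? m = some (states.getD m.toNat []) := by
  have hps : (PySem.Dict.mk (states.zipIdx.map (fun p => (p.1, (p.2 : Int))))).items.map
      (fun p : List Char × Int => (p.2, p.1)) =
      states.zipIdx.map (fun p => ((p.2 : Int), p.1)) := by
    simp only [List.map_map]; rfl
  rw [hps]
  have hfst : (states.zipIdx.map (fun p => ((p.2 : Int), p.1))).map Prod.fst =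
      (List.range' 0 states.length).map (fun a => ((a : Nat) : Int)) := by
    rw [List.map_map, ← pvZipIdxSnd states 0]
    rfl
  have hndf : ((states.zipIdx.map (fun p => ((p.2 : Int), p.1))).map Prod.fst).Nodup := by
    rw [hfst]
    exact (List.nodup_range').map (fun a b h => by omega)
  have hitems := pvOfListItems _ hndf
  refine PySem.Dict.get?_of_mem_items _ ?_ ?_
  · rw [hitems, List.mem_iff_getElem]
    refine ⟨m.toNat, by simp [List.length_zipIdx]; omega, ?_⟩
    rw [List.getElem_map, List.getElem_zipIdx]
    rw [List.getD_eq_getElem _ _ hm]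
    simp [Int.toNat_of_nonneg h0]
  · simp only [PySem.Dict.keys, hitems]
    exact hndf

theorem pvLockstep (letters : List Char) (hnd : letters.Nodup)
    (data : List String) (P : List Int) (R : List Char)
    (hrun : ∀ L, L.Perm letters → pvRunMoves L data = some (pvSPR letters P R L))
    (hP : P.Perm (PySem.List.pyRange 0 (letters.length : Int) 1))
    (hR : R.Perm letters) :
    ∀ fuel cur states, Nat.factorial letters.length + 1 ≤ fuel + states.length →
      cur.Perm letters → (∀ s ∈ states, s.Perm letters) → states.Nodup →
      ∃ sts, pvLoopB P (PySem.Dict.ofList (letters.zip R)) fuel cur states states = some sts ∧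
        sts ≠ [] ∧
        pvLoopA data fuel cur (PySem.Dict.mk (states.zipIdx.map (fun p => (p.1, (p.2 : Int)))))
            (states.length : Int) =
          some (String.ofList (sts.getD (PySem.Int.mod 1000000000 (sts.length : Int)).toNat [])) := by
  intro fuel
  induction fuel with
  | zero =>
    intro cur states hfuel hcur hall hnds
    exfalso
    have := pvPigeonhole letters states hnds hall
    omega
  | succ fuel ih =>
    intro cur states hfuel hcur hall hnds
    by_cases hmem : cur ∈ states
    · -- both loops exit here
      have hcont : states.contains cur = true := by simpa using hmem
      have hne : states ≠ [] := List.ne_nil_of_mem hmem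
      have hpos : (0 : Int) < (states.length : Int) := by
        have := List.length_pos_iff.2 hne
        omega
      refine ⟨states, ?_, hne, ?_⟩
      · unfold pvLoopB
        rw [show PySem.Set.contains states cur = states.contains cur from rfl, hcont]
        rfl
      · unfold pvLoopA
        rw [pvKnownContains, hcont]
        rw [if_pos rfl]
        have h0 : 0 ≤ PySem.Int.mod 1000000000 (states.length : Int) :=
          PySem.Int.mod_nonneg _ hpos
        have hlt : PySem.Int.mod 1000000000 (states.length : Int) < (states.length : Int) :=
          PySem.Int.mod_lt _ hpos
        rw [pvInvLookup states _ h0 (by omega)]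
        rfl
    · -- both loops take one more step
      have hcont : states.contains cur = false := by
        rw [← Bool.not_eq_true]
        simpa using hmem
      have hnxt : pvRunMoves cur data = some (pvSPR letters P R cur) := hrun cur hcur
      have hstep : pvStep P (PySem.Dict.ofList (letters.zip R)) cur =
          some (pvSPR letters P R cur) := pvStep_eq letters P R cur hnd hP hR hcur
      have hcurp : (pvSPR letters P R cur).Perm letters := pvSPR_perm letters P R cur hnd hP hR hcur
      obtain ⟨sts, hB, hne, hA⟩ := ih (pvSPR letters P R cur) (states ++ [cur])
        (by simp; omega) hcurp
        (by intro s hs; rcases List.mem_append.1 hs with h | h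
            · exact hall s h
            · rw [List.mem_singleton.1 h]; exact hcur)
        (by simp [List.nodup_append, hnds]; exact fun a ha hac => hmem (hac ▸ ha))
      refine ⟨sts, ?_, hne, ?_⟩
      · unfold pvLoopB
        rw [show PySem.Set.contains states cur = states.contains cur from rfl, hcont]
        rw [if_neg (by simp), hstep]
        rw [show PySem.Set.add states cur = states ++ [cur] from
          PySem.Set.add_of_not_mem hmem]
        exact hB
      · unfold pvLoopA
        rw [pvKnownContains, hcont]
        rw [if_neg (by simp), hnxt]
        have hins : (PySem.Dict.mk (states.zipIdx.map (fun p => (p.1, (p.2 : Int))))).insert cur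
            (states.length : Int) =
            PySem.Dict.mk ((states ++ [cur]).zipIdx.map (fun p => (p.1, (p.2 : Int)))) := by
          apply PySem.Dict.ext
          rw [PySem.Dict.items_insert_of_not_contains _ _ (by rw [pvKnownContains]; exact hcont)]
          rw [show (PySem.Dict.mk ((states ++ [cur]).zipIdx.map (fun p => (p.1, (p.2 : Int))))).items
            = (states ++ [cur]).zipIdx.map (fun p => (p.1, (p.2 : Int))) from rfl]
          rw [List.zipIdx_append]
          simp [List.zipIdx_cons]
        rw [hins]
        have hlen : ((states ++ [cur]).length : Int) = (states.length : Int) + 1 := by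
          simp
        rw [← hlen]
        exact hA

-- ===== VERDICT (by name: the statement is the Claim_ definition above) =====
theorem part2_spec : Claim_equal_part2 := by
  unfold Claim_equal_part2
  intro data length hdom hpre
  unfold Spec_part2 part2 part2_alt
  dsimp only
  have hnd := pvLetters_nodup length
  obtain ⟨P, R, hbuild, hPp, hRp, hrun0⟩ := pvBridge (pvLetters length) hnd data hpre
    (PySem.List.pyRange 0 ((pvLetters length).length : Int) 1) (pvLetters length)
    (List.Perm.refl _) (List.Perm.refl _)
  have hrun : ∀ L, L.Perm (pvLetters length) →
      pvRunMoves L data = some (pvSPR (pvLetters length) P R L) := by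
    intro L hL
    have h := hrun0 L hL
    rwa [pvSPR_id (pvLetters length) L hnd hL] at h
  obtain ⟨sts, hB, hne, hA⟩ := pvLockstep (pvLetters length) hnd data P R hrun hPp hRp
    (Nat.factorial (pvLetters length).length + 1) (pvLetters length) []
    (by simp) (List.Perm.refl _) (by simp) List.nodup_nil
  have hA' : pvLoopA data (Nat.factorial (pvLetters length).length + 1) (pvLetters length)
      PySem.Dict.empty 0 =
      some (String.ofList (sts.getD (PySem.Int.mod 1000000000 (sts.length : Int)).toNat [])) := hA
  have hB' : pvLoopB P (PySem.Dict.ofList ((pvLetters length).zip R))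
      (Nat.factorial (pvLetters length).length + 1) (pvLetters length) [] PySem.Set.empty =
      some sts := hB
  rw [hA', hbuild]
  dsimp only
  rw [hB']
  dsimp only
  have hpos : (0 : Int) < (sts.length : Int) := by
    have := List.length_pos_iff.2 hne
    omega
  have h0 : 0 ≤ PySem.Int.mod 1000000000 (sts.length : Int) :=
    PySem.Int.mod_nonneg _ hpos
  have hlt : PySem.Int.mod 1000000000 (sts.length : Int) < (sts.length : Int) :=
    PySem.Int.mod_lt _ hpos
  rw [show PySem.List.len sts = (sts.length : Int) from by simp [PySem.List.len_eq]]
  rw [PySem.List.pyGet?_of_nonneg _ h0,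
    List.getElem?_eq_getElem (by omega : (PySem.Int.mod 1000000000 (sts.length : Int)).toNat < sts.length)]
  simp [List.getElem?_eq_getElem
    (show (PySem.Int.mod 1000000000 (sts.length : Int)).toNat < sts.length by omega)]
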